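-- pv_equiv track=rewrite | github.com/voltvirtuoso/Real_Time_Object_Detection | RTOD.py | get_frame_skip_pattern
-- ===== SOURCE A (Python) =====
-- def get_frame_skip_pattern(source_fps, target_fps):
--     skip_pattern = []
--     if source_fps <= target_fps:
--         return skip_pattern  # No skipping needed if source FPS is less or equal
--     skip_interval = max(1, source_fps // target_fps)
--     for i in range(1, int(source_fps) + 1):
--         if (i - 1) % skip_interval != 0:
--             skip_pattern.append(i - 1)
--     return skip_pattern
-- ===== SOURCE B (Python) =====
-- def get_frame_skip_pattern(source_fps, target_fps):
--     if source_fps <= target_fps: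
--         return []
--     skip_interval = max(1, source_fps // target_fps)
--     n = int(source_fps)
--     s = int(skip_interval)
--     skip_pattern = []
--     for b in range(0, n, s):
--         # keep every offset in this block except the block start itself
--         skip_pattern.extend(range(b + 1, min(b + s, n)))
--     return skip_pattern
-- ===== Notes on version B (the rewrite author's own statement) =====
-- stated objective: alternative
-- what changed: Replaces the flat 1..n loop with a modulo test on every index by a block iteration with step s that emits each block's nonzero offsets b+1..min(b+s,n)-1 directly, never computing a remainder.
import Mathlib
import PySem

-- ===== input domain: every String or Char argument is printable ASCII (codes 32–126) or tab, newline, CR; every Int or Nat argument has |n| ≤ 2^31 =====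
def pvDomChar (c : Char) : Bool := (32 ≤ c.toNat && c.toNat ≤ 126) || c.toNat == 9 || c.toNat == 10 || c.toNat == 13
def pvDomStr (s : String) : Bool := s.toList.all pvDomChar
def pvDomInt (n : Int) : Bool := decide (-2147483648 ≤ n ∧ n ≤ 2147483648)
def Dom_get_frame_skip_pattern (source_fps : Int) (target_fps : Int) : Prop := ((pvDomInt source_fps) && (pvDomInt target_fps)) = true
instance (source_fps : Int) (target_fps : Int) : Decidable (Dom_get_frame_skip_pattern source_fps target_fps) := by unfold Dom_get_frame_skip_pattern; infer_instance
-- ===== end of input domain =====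

-- B replaces the flat modulo-test loop by a block iteration emitting each block's
-- nonzero offsets directly (alternative decomposition, same cost; return value only).

-- ===== PORT A =====
def get_frame_skip_pattern (source_fps : Int) (target_fps : Int) : List Int :=
  let skip_pattern : List Int := []
  if source_fps ≤ target_fps then skip_pattern
  else
    let skip_interval := max 1 (PySem.Int.floordiv source_fps target_fps)
    (PySem.List.pyRange 1 (source_fps + 1) 1).foldl
      (fun acc i => if (PySem.Int.mod (i - 1) skip_interval != 0) then acc ++ [i - 1] else acc)
      skip_pattern

-- ===== PORT B =====
def get_frame_skip_pattern_alt (source_fps : Int) (target_fps : Int) : List Int :=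
  if source_fps ≤ target_fps then []
  else
    let skip_interval := max 1 (PySem.Int.floordiv source_fps target_fps)
    let n := source_fps
    let s := skip_interval
    (PySem.List.pyRange 0 n s).foldl
      (fun acc b => acc ++ PySem.List.pyRange (b + 1) (min (b + s) n) 1) []

-- ===== PRECONDITION & SPEC =====
-- Pre_ excludes exactly the inputs where Python A raises ZeroDivisionError
-- (source_fps > target_fps = 0); B raises there too.
def Pre_get_frame_skip_pattern (source_fps : Int) (target_fps : Int) : Prop :=
  ¬ (target_fps = 0 ∧ 0 < source_fps)
instance (source_fps : Int) (target_fps : Int) : Decidable (Pre_get_frame_skip_pattern source_fps target_fps) := by unfold Pre_get_frame_skip_pattern; infer_instance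

def pvWitness_get_frame_skip_pattern : Int × Int := (30, 10)

def Spec_get_frame_skip_pattern (source_fps : Int) (target_fps : Int) (out : List Int) : Prop := out = get_frame_skip_pattern_alt source_fps target_fps
instance (source_fps : Int) (target_fps : Int) (out : List Int) : Decidable (Spec_get_frame_skip_pattern source_fps target_fps out) := by unfold Spec_get_frame_skip_pattern; infer_instance

-- ===== CLAIM (what is proved, stated in full; the proofs are below) =====
def Claim_equal_get_frame_skip_pattern : Prop := ∀ (source_fps : Int) (target_fps : Int), Dom_get_frame_skip_pattern source_fps target_fps → Pre_get_frame_skip_pattern source_fps target_fps → Spec_get_frame_skip_pattern source_fps target_fps (get_frame_skip_pattern source_fps target_fps)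

-- ===== LEMMAS AND PROOFS =====

-- step-s range peels its first element
lemma pyRange_cons_of_pos (a b s : Int) (hs : 0 < s) (h : a < b) :
    PySem.List.pyRange a b s = a :: PySem.List.pyRange (a + s) b s := by
  rw [PySem.List.pyRange_of_pos _ _ hs, PySem.List.pyRange_of_pos _ _ hs, if_pos h]
  by_cases h2 : a + s < b
  · rw [if_pos h2]
    have hc : ((b - a + s - 1) / s).toNat = ((b - (a + s) + s - 1) / s).toNat + 1 := by
      have : b - a + s - 1 = (b - (a + s) + s - 1) + 1 * s := by ring
      rw [this, Int.add_mul_ediv_right _ _ (by omega : s ≠ 0)]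
      have h0 : (0:Int) ≤ (b - (a + s) + s - 1) / s :=
        Int.ediv_nonneg (by omega) (by omega)
      omega
    rw [hc, List.range_succ_eq_map, List.map_cons, List.map_map]
    congr 1
    · simp
    · apply List.map_congr_left
      intro k _
      simp only [Function.comp]
      push_cast
      ring
  · rw [if_neg h2]
    have hc : (b - a + s - 1) / s = 1 := by
      have h1 : PySem.Int.floordiv (b - a + s - 1) s = 1 := by
        rw [PySem.Int.floordiv_eq_iff_of_pos hs]; omega
      rw [PySem.Int.floordiv_eq_ediv_of_pos hs] at h1
      exact h1
    rw [hc]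
    simp

-- within a block starting at a multiple of s, filtering drops exactly the start
lemma filter_block (s a b : Int) (hdvd : s ∣ a) (hab : a < b) (hb : b ≤ a + s) :
    List.filter (fun j => PySem.Int.mod j s != 0) (PySem.List.pyRange a b 1)
      = PySem.List.pyRange (a + 1) b 1 := by
  rw [PySem.List.pyRange_one_cons hab, List.filter_cons]
  have ha0 : PySem.Int.mod a s = 0 := (PySem.Int.mod_eq_zero_iff_dvd a s).mpr hdvd
  simp only [ha0, bne_self_eq_false]
  apply List.filter_eq_self.mpr
  intro j hj
  rw [PySem.List.mem_pyRange_one] at hj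
  simp only [bne_iff_ne, ne_eq]
  intro hj0
  have hdj : s ∣ j := (PySem.Int.mod_eq_zero_iff_dvd j s).mp hj0
  have hsub : s ∣ (j - a) := Int.dvd_sub hdj hdvd
  have hle := Int.le_of_dvd (by omega) hsub
  omega

-- the filtered flat range equals the block decomposition
lemma blocks_eq (s : Int) (hs : 0 < s) :
    ∀ (m : Nat) (a n : Int), n - a ≤ (m : Int) → s ∣ a →
      List.filter (fun j => PySem.Int.mod j s != 0) (PySem.List.pyRange a n 1)
        = List.flatMap (fun b => PySem.List.pyRange (b + 1) (min (b + s) n) 1)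
            (PySem.List.pyRange a n s) := by
  intro m
  induction m with
  | zero =>
      intro a n hm _
      rw [PySem.List.pyRange_one_eq_nil (by omega),
          PySem.List.pyRange_of_pos _ _ hs, if_neg (by omega)]
      simp
  | succ m ih =>
      intro a n hm hdvd
      by_cases hlt : a < n
      · rcases le_or_gt (a + s) n with hsn | hsn
        · rw [PySem.List.pyRange_one_append a (a + s) n (by omega) hsn,
              List.filter_append, pyRange_cons_of_pos a n s hs hlt, List.flatMap_cons]
          congr 1
          · rw [min_eq_left hsn]
            exact filter_block s a (a + s) hdvd (by omega) (le_refl _)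
          · exact ih (a + s) n (by omega) (hdvd.add (dvd_refl s))
        · rw [pyRange_cons_of_pos a n s hs hlt, List.flatMap_cons,
              PySem.List.pyRange_of_pos (a + s) n hs, if_neg (by omega)]
          simp only [List.range_zero, List.map_nil, List.flatMap_nil, List.append_nil]
          rw [min_eq_right (by omega : n ≤ a + s)]
          exact filter_block s a n hdvd hlt (by omega)
      · rw [PySem.List.pyRange_one_eq_nil (by omega),
            PySem.List.pyRange_of_pos _ _ hs, if_neg (by omega)]
        simp

-- range(1, n+1) is range(0, n) shifted by one
lemma pyRange_shift (n : Int) :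
    PySem.List.pyRange 1 (n + 1) 1 = (PySem.List.pyRange 0 n 1).map (· + 1) := by
  rw [PySem.List.pyRange_one, PySem.List.pyRange_one, List.map_map]
  have : n + 1 - 1 = n - 0 := by ring
  rw [this]
  apply List.map_congr_left
  intro k _
  simp [Function.comp]
  ring

-- ===== VERDICT (by name: the statement is the Claim_ definition above) =====
theorem get_frame_skip_pattern_spec : Claim_equal_get_frame_skip_pattern := by
  intro n t _ _
  unfold Spec_get_frame_skip_pattern get_frame_skip_pattern get_frame_skip_pattern_alt
  by_cases hg : n ≤ t
  · simp [hg]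
  · simp only [hg, if_false]
    set s := max 1 (PySem.Int.floordiv n t) with hsdef
    have hs : 0 < s := lt_of_lt_of_le one_pos (le_max_left _ _)
    rw [PySem.List.foldl_append_if (fun i => PySem.Int.mod (i - 1) s != 0) (fun i => i - 1),
        PySem.List.foldl_append_eq_flatMap, List.nil_append, List.nil_append,
        pyRange_shift, List.filter_map, List.map_map]
    have hmap : ∀ L : List Int, L.map ((fun i => i - 1) ∘ (· + 1)) = L := by
      intro L
      have : ((fun (i : Int) => i - 1) ∘ (· + 1)) = id := by
        funext x; simp
      rw [this, List.map_id]
    rw [hmap]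
    have hfilt :
        List.filter ((fun i => PySem.Int.mod (i - 1) s != 0) ∘ (· + 1)) (PySem.List.pyRange 0 n 1)
          = List.filter (fun j => PySem.Int.mod j s != 0) (PySem.List.pyRange 0 n 1) := by
      apply List.filter_congr
      intro j _
      simp [Function.comp]
    rw [hfilt]
    exact blocks_eq s hs (n.toNat) 0 n (by omega) (dvd_zero s)
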